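-- pv_equiv track=rewrite | github.com/IStoleYourCookie/SimPyChat | test.py | find_positive
-- ===== SOURCE A (Python) =====
-- bad = ["black", "old", "stop", "cold", "cut", "fall", "far", "hot", "hurt", "never",
--         "bear", "fire", "night", "rain", "snow", "wind", "hate", "bad", "die", "death"]
--
-- good = ["funny", "eat", "good", "pretty", "white", "fly", "know", "live", "thank", "best", "fast", "first", "sing", "sleep", "better", "clean",
--          "full", "drink", "kind", "laugh", "light", "own", "start", "together", "warm",
--          "apple", "baby", "bed", "bird, birthday", "cake", "children", "Christmas", "father", "flower", "game", "garden", "home", "kitty", "money",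
--          "mother", "party", "Santa Claus", "song", "sun", "toy", "beautiful", "like", "love", "well"]
--
-- def score(input):
--     points = 0
--     for s in input:
--         if s in bad:
--             points -= 1
--         elif s in good:
--             points += 1
--     return points
--
-- def score_words(input):
--     default = score(input)
--     points = []
--     for s in input:
--         if s in bad:
--             points.append(default - 1)
--         elif s in good:
--             points.append(default + 1)
--         else:
--             points.append(default)
--     return points
--
-- def find_positive(input):
--     points = score_words(input)
--     i = 0
--     better = []
--     default = score(input)
--     for s in input:
--         if points[i] > default:
--             better.append(s)
--         i += 1
--
--     better.sort()
--     return better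
-- ===== SOURCE B (Python) =====
-- good = ["funny", "eat", "good", "pretty", "white", "fly", "know", "live", "thank", "best", "fast", "first", "sing", "sleep", "better", "clean",
--          "full", "drink", "kind", "laugh", "light", "own", "start", "together", "warm",
--          "apple", "baby", "bed", "bird, birthday", "cake", "children", "Christmas", "father", "flower", "game", "garden", "home", "kitty", "money",
--          "mother", "party", "Santa Claus", "song", "sun", "toy", "beautiful", "like", "love", "well"]
--
-- def find_positive(input):
--     # single pass: keep the result sorted at all times by inserting each good
--     # word at its place (no score table, no final sort)
--     result = []
--     for s in input:
--         if s in good: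
--             i = 0
--             while i < len(result) and result[i] <= s:
--                 i += 1
--             result.insert(i, s)
--     return result
-- ===== Notes on version B (the rewrite author's own statement) =====
-- stated objective: alternative
-- what changed: B drops A's per-word score table, baseline score and final sort: a word scores above the baseline exactly when it is in the (bad-disjoint) good list, so B makes one pass inserting each good word into an always-sorted accumulator (online insertion sort).
import Mathlib
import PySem

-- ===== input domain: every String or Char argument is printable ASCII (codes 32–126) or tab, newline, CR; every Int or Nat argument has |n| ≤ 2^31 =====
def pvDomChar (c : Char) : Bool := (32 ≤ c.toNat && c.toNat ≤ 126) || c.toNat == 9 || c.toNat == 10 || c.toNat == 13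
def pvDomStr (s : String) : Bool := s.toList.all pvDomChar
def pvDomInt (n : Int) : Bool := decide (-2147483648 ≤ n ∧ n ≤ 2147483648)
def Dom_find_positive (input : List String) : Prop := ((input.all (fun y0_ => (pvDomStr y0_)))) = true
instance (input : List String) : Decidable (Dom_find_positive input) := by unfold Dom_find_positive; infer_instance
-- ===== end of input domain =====

-- B drops A's score table, baseline and final sort; it makes one pass inserting each
-- good word into an always-sorted accumulator (objective: alternative decomposition).

-- ===== PORT A =====
def pvBad : List String := ["black", "old", "stop", "cold", "cut", "fall", "far", "hot", "hurt", "never",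
        "bear", "fire", "night", "rain", "snow", "wind", "hate", "bad", "die", "death"]

def pvGood : List String := ["funny", "eat", "good", "pretty", "white", "fly", "know", "live", "thank", "best", "fast", "first", "sing", "sleep", "better", "clean",
         "full", "drink", "kind", "laugh", "light", "own", "start", "together", "warm",
         "apple", "baby", "bed", "bird, birthday", "cake", "children", "Christmas", "father", "flower", "game", "garden", "home", "kitty", "money",
         "mother", "party", "Santa Claus", "song", "sun", "toy", "beautiful", "like", "love", "well"]

def pvScore (input : List String) : Int :=
  input.foldl (fun points s =>
    if pvBad.contains s then points - 1
    else if pvGood.contains s then points + 1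
    else points) 0

def pvScoreWords (input : List String) : List Int :=
  let default := pvScore input
  input.foldl (fun points s =>
    if pvBad.contains s then points ++ [default - 1]
    else if pvGood.contains s then points ++ [default + 1]
    else points ++ [default]) []

def find_positive (input : List String) : List String :=
  let points := pvScoreWords input
  let default := pvScore input
  -- Python maintains a manual counter i and looks up points[i]; i is always in range,
  -- so pyGet? always returns some; getD default is never the fallback.
  let st := input.foldl (fun (st : Int × List String) s =>
    (st.1 + 1, if (PySem.List.pyGet? points st.1).getD default > default
               then st.2 ++ [s] else st.2)) ((0 : Int), [])
  PySem.List.sorted st.2 (fun x => x) false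

-- ===== PORT B =====
-- the while-scan + list.insert of Source B: walk past the elements ≤ s, put s there
def pvInsertSorted (s : String) : List String → List String
  | [] => [s]
  | x :: t => if x ≤ s then x :: pvInsertSorted s t else s :: x :: t

def find_positive_alt (input : List String) : List String :=
  input.foldl (fun result s =>
    if pvGood.contains s then pvInsertSorted s result else result) []

-- ===== PRECONDITION & SPEC =====
def Spec_find_positive (input : List String) (out : List String) : Prop := out = find_positive_alt input
instance (input : List String) (out : List String) : Decidable (Spec_find_positive input out) := by unfold Spec_find_positive; infer_instance

-- ===== CLAIM (what is proved, stated in full; the proofs are below) =====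
def Claim_equal_find_positive : Prop := ∀ (input : List String), Dom_find_positive input → Spec_find_positive input (find_positive input)

-- ===== LEMMAS AND PROOFS =====

def pvF (d : Int) (s : String) : Int :=
  if pvBad.contains s then d - 1 else if pvGood.contains s then d + 1 else d

theorem pvScoreWords_eq_map (input : List String) :
    pvScoreWords input = input.map (pvF (pvScore input)) := by
  unfold pvScoreWords
  generalize pvScore input = d
  suffices h : ∀ (l : List String) (acc : List Int),
      l.foldl (fun points s =>
        if pvBad.contains s then points ++ [d - 1]
        else if pvGood.contains s then points ++ [d + 1]
        else points ++ [d]) acc = acc ++ l.map (pvF d) by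
    simpa using h input []
  intro l
  induction l with
  | nil => intro acc; simp
  | cons s t ih =>
    intro acc
    simp only [List.foldl_cons, ih, List.map_cons, pvF]
    split_ifs <;> simp

theorem pvGood_disjoint_bad : ∀ s : String, s ∈ pvBad → s ∉ pvGood := by
  intro s hs
  fin_cases hs <;> decide

theorem pvCond (d : Int) (s : String) :
    (pvF d s > d) ↔ s ∈ pvGood := by
  unfold pvF
  by_cases hb : s ∈ pvBad
  · have hg : s ∉ pvGood := pvGood_disjoint_bad s hb
    simp [List.contains_eq_mem, hb, hg]
  · by_cases hg : s ∈ pvGood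
    · simp [List.contains_eq_mem, hb, hg]
    · simp [List.contains_eq_mem, hb, hg]

theorem pvLoop (d : Int) (points : List Int) :
    ∀ (suf : List String) (i : Int) (acc : List String),
    (∀ j : Nat, j < suf.length → PySem.List.pyGet? points (i + j) = suf[j]?.map (pvF d)) →
    (suf.foldl (fun (st : Int × List String) s =>
        (st.1 + 1, if (PySem.List.pyGet? points st.1).getD d > d
                   then st.2 ++ [s] else st.2)) (i, acc)).2
      = acc ++ suf.filter (fun s => pvGood.contains s) := by
  intro suf
  induction suf with
  | nil => intro i acc _; simp
  | cons s t ih =>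
    intro i acc h
    have h0 : PySem.List.pyGet? points i = some (pvF d s) := by
      have := h 0 (by simp); simpa using this
    have hshift : ∀ j : Nat, j < t.length →
        PySem.List.pyGet? points ((i + 1) + j) = t[j]?.map (pvF d) := by
      intro j hj
      have := h (j + 1) (by simpa using Nat.succ_lt_succ hj)
      simpa [Int.add_assoc, Int.add_comm 1 (j : Int), List.getElem?_cons] using this
    rw [List.foldl_cons]
    by_cases hg : s ∈ pvGood
    · have hc : (PySem.List.pyGet? points i).getD d > d := by
        rw [h0]
        simpa using (pvCond d s).mpr hg
      rw [if_pos hc, ih (i + 1) (acc ++ [s]) hshift]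
      simp [List.contains_eq_mem, hg]
    · have hc : ¬ ((PySem.List.pyGet? points i).getD d > d) := by
        rw [h0]
        intro hlt
        exact hg ((pvCond d s).mp (by simpa using hlt))
      rw [if_neg hc, ih (i + 1) acc hshift]
      simp [List.contains_eq_mem, hg]

theorem pvIndex (d : Int) (input : List String) :
    ∀ j : Nat, j < input.length →
      PySem.List.pyGet? (input.map (pvF d)) ((0 : Int) + j) = input[j]?.map (pvF d) := by
  intro j hj
  have : ((0 : Int) + j) = ((j : Nat) : Int) := by omega
  rw [this, PySem.List.pyGet?_natCast]
  simp [List.getElem?_map]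

theorem pvInsertSorted_perm (s : String) (l : List String) :
    (pvInsertSorted s l).Perm (s :: l) := by
  induction l with
  | nil => simp [pvInsertSorted]
  | cons x t ih =>
    unfold pvInsertSorted
    split_ifs
    · exact ((ih.cons x).trans (List.Perm.swap s x t))
    · exact List.Perm.refl _

theorem pvInsertSorted_pairwise (s : String) (l : List String)
    (h : l.Pairwise (· ≤ ·)) : (pvInsertSorted s l).Pairwise (· ≤ ·) := by
  induction l with
  | nil => simp [pvInsertSorted]
  | cons x t ih =>
    rcases List.pairwise_cons.mp h with ⟨hx, ht⟩
    unfold pvInsertSorted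
    split_ifs with hle
    · refine List.pairwise_cons.mpr ⟨?_, ih ht⟩
      intro y hy
      rcases List.mem_cons.mp ((pvInsertSorted_perm s t).mem_iff.mp hy) with hy | hy
      · simpa [hy] using hle
      · exact hx y hy
    · refine List.pairwise_cons.mpr ⟨?_, h⟩
      intro y hy
      have hsx : s ≤ x := le_of_not_ge hle
      rcases List.mem_cons.mp hy with hy | hy
      · simpa [hy] using hsx
      · exact le_trans hsx (hx y hy)

theorem pvAltLoop (l : List String) :
    ∀ acc : List String, acc.Pairwise (· ≤ ·) →
      (l.foldl (fun result s =>
          if pvGood.contains s then pvInsertSorted s result else result) acc).Pairwise (· ≤ ·)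
      ∧ (l.foldl (fun result s =>
          if pvGood.contains s then pvInsertSorted s result else result) acc).Perm
          (acc ++ l.filter (fun s => pvGood.contains s)) := by
  induction l with
  | nil => intro acc hacc; exact ⟨hacc, by simp⟩
  | cons s t ih =>
    intro acc hacc
    rw [List.foldl_cons]
    by_cases hg : pvGood.contains s = true
    · rw [if_pos hg]
      rcases ih (pvInsertSorted s acc) (pvInsertSorted_pairwise s acc hacc) with ⟨h1, h2⟩
      refine ⟨h1, h2.trans ?_⟩
      have : (pvInsertSorted s acc ++ t.filter (fun s => pvGood.contains s)).Perm
          ((s :: acc) ++ t.filter (fun s => pvGood.contains s)) :=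
        (pvInsertSorted_perm s acc).append_right _
      refine this.trans ?_
      rw [List.filter_cons, if_pos hg]
      exact List.perm_middle.symm
    · rw [if_neg hg]
      rcases ih acc hacc with ⟨h1, h2⟩
      refine ⟨h1, h2.trans ?_⟩
      rw [List.filter_cons, if_neg hg]

-- ===== VERDICT (by name: the statement is the Claim_ definition above) =====
theorem find_positive_spec : Claim_equal_find_positive := by
  intro input _
  unfold Spec_find_positive
  have hA : find_positive input
      = PySem.List.sorted (input.filter (fun s => pvGood.contains s)) (fun x => x) false := by
    unfold find_positive
    simp only [pvScoreWords_eq_map,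
      pvLoop (pvScore input) (input.map (pvF (pvScore input))) input 0 []
        (pvIndex (pvScore input) input),
      List.nil_append]
  rcases pvAltLoop input [] (by simp) with ⟨hpw, hperm⟩
  have hperm' : (find_positive_alt input).Perm (input.filter fun s => pvGood.contains s) := by
    simpa [find_positive_alt] using hperm
  rw [hA]
  exact PySem.List.sorted_id_eq_of_perm_of_pairwise _ _ hperm' hpw
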